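-- pv_equiv track=rewrite | github.com/fadawkas/themisAI | scraper/pdf2jsonl_legal.py | strip_headers_footers
-- ===== SOURCE A (Python) =====
-- HDR_FTR_MAX_LINES = 3  # strip up to top/bottom N lines if repeated
--
-- def strip_headers_footers(page_texts):
--     """Remove constant header/footer lines across pages."""
--     if not page_texts: return ""
--     pages = [t.splitlines() for t in page_texts]
--     # candidate header/footer by intersection of first/last few lines
--     headers = set(pages[0][:HDR_FTR_MAX_LINES]) if pages[0] else set()
--     footers = set(pages[0][-HDR_FTR_MAX_LINES:]) if pages[0] else set()
--     for lines in pages[1:]: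
--         headers &= set(lines[:HDR_FTR_MAX_LINES])
--         footers &= set(lines[-HDR_FTR_MAX_LINES:])
--     cleaned=[]
--     for lines in pages:
--         # drop matched header/footer
--         start = 0
--         end = len(lines)
--         while start < len(lines) and lines[start] in headers:
--             start += 1
--         while end > 0 and lines[end-1] in footers:
--             end -= 1
--         cleaned.append("\n".join(lines[start:end]))
--     return "\n".join(cleaned)
-- ===== SOURCE B (Python) =====
-- HDR_FTR_MAX_LINES = 3  # strip up to top/bottom N lines if repeated
--
-- def strip_headers_footers(page_texts):
--     """Remove constant header/footer lines across pages."""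
--     if not page_texts:
--         return ""
--     pages = [t.splitlines() for t in page_texts]
--     n = len(pages)
--     # phase 1: tally, per page, the distinct candidate lines into two tables
--     hdr_tally = {}
--     ftr_tally = {}
--     for lines in pages:
--         for line in dict.fromkeys(lines[:HDR_FTR_MAX_LINES]):
--             hdr_tally[line] = hdr_tally.get(line, 0) + 1
--         for line in dict.fromkeys(lines[-HDR_FTR_MAX_LINES:]):
--             ftr_tally[line] = ftr_tally.get(line, 0) + 1
--     # a line is a header/footer iff it was tallied on every page
--     headers = {line for line, c in hdr_tally.items() if c == n}
--     footers = {line for line, c in ftr_tally.items() if c == n}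
--     cleaned = []
--     for lines in pages:
--         start = 0
--         end = len(lines)
--         while start < len(lines) and lines[start] in headers:
--             start += 1
--         while end > 0 and lines[end - 1] in footers:
--             end -= 1
--         cleaned.append("\n".join(lines[start:end]))
--     return "\n".join(cleaned)
-- ===== Notes on version B (the rewrite author's own statement) =====
-- stated objective: alternative
-- what changed: A detects shared header/footer lines by incrementally intersecting per-page candidate sets; B builds two tally tables counting on how many pages each distinct candidate line occurs and then keeps the lines whose tally equals the page count.
import Mathlib
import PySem

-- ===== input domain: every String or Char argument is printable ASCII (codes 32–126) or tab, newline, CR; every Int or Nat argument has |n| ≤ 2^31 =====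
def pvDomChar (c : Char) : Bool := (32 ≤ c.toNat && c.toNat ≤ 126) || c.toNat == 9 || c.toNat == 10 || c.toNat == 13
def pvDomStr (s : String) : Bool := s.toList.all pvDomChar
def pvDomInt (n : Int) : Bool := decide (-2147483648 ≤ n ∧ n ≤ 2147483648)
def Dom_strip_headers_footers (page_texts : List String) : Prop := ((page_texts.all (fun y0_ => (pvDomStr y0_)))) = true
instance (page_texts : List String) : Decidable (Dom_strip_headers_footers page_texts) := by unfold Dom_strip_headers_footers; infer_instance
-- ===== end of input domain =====

-- B replaces A's incremental set-intersection of candidate header/footer lines by a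
-- build-a-tally-table-then-filter pass (count, per page, the distinct candidate lines;
-- keep those tallied on every page); same cost, different decomposition (objective: alternative).

-- ===== PORT A =====

def HDR_FTR_MAX_LINES : Int := 3

-- while start < len(lines) and lines[start] in headers: start += 1
def pvStartLoop (lines : List String) (hdrs : PySem.Set String) (start : Nat) : Nat :=
  if h : start < lines.length then
    if PySem.Set.contains hdrs (lines[start]'h) then pvStartLoop lines hdrs (start + 1)
    else start
  else start
termination_by lines.length - start

-- while end > 0 and lines[end-1] in footers: end -= 1   (e ≤ lines.length at every call, so getD is exact)
def pvEndLoop (lines : List String) (ftrs : PySem.Set String) (e : Nat) : Nat :=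
  if 0 < e then
    if PySem.Set.contains ftrs (lines.getD (e - 1) "") then pvEndLoop lines ftrs (e - 1)
    else e
  else e

-- the body of A's second loop (shared verbatim by both Pythons)
def pvTrimPage (hdrs ftrs : PySem.Set String) (lines : List String) : String :=
  let start := pvStartLoop lines hdrs 0
  let e := pvEndLoop lines ftrs lines.length
  PySem.Str.join "\n" (PySem.List.slice lines (some (start : Int)) (some (e : Int)))

def strip_headers_footers (page_texts : List String) : String :=
  if page_texts = [] then "" else
  let pages := page_texts.map PySem.Str.splitlines
  let first := pages.headD []
  let headers0 : PySem.Set String :=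
    if first ≠ [] then PySem.Set.ofList (PySem.List.slice first none (some HDR_FTR_MAX_LINES)) else PySem.Set.empty
  let footers0 : PySem.Set String :=
    if first ≠ [] then PySem.Set.ofList (PySem.List.slice first (some (-HDR_FTR_MAX_LINES)) none) else PySem.Set.empty
  let headers := pages.tail.foldl
    (fun s lines => PySem.Set.inter s (PySem.Set.ofList (PySem.List.slice lines none (some HDR_FTR_MAX_LINES)))) headers0
  let footers := pages.tail.foldl
    (fun s lines => PySem.Set.inter s (PySem.Set.ofList (PySem.List.slice lines (some (-HDR_FTR_MAX_LINES)) none))) footers0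
  let cleaned := pages.map (pvTrimPage headers footers)
  PySem.Str.join "\n" cleaned

-- ===== PORT B =====

-- one tally pass: for line in dict.fromkeys(candidates): tally[line] = tally.get(line, 0) + 1
def pvTallyStep (d : PySem.Dict String Int) (cand : List String) : PySem.Dict String Int :=
  (PySem.List.dedup cand).foldl (fun d line => d.modify line 0 (· + 1)) d

def strip_headers_footers_alt (page_texts : List String) : String :=
  if page_texts = [] then "" else
  let pages := page_texts.map PySem.Str.splitlines
  let n : Int := (pages.length : Int)
  let hdr_tally := pages.foldl
    (fun d lines => pvTallyStep d (PySem.List.slice lines none (some HDR_FTR_MAX_LINES))) PySem.Dict.empty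
  let ftr_tally := pages.foldl
    (fun d lines => pvTallyStep d (PySem.List.slice lines (some (-HDR_FTR_MAX_LINES)) none)) PySem.Dict.empty
  let headers : PySem.Set String :=
    PySem.Set.ofList ((hdr_tally.items.filter (fun p => p.2 == n)).map (·.1))
  let footers : PySem.Set String :=
    PySem.Set.ofList ((ftr_tally.items.filter (fun p => p.2 == n)).map (·.1))
  let cleaned := pages.map (pvTrimPage headers footers)
  PySem.Str.join "\n" cleaned

-- ===== PRECONDITION & SPEC =====
def Spec_strip_headers_footers (page_texts : List String) (out : String) : Prop := out = strip_headers_footers_alt page_texts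
instance (page_texts : List String) (out : String) : Decidable (Spec_strip_headers_footers page_texts out) := by unfold Spec_strip_headers_footers; infer_instance

-- ===== CLAIM (what is proved, stated in full; the proofs are below) =====
def Claim_equal_strip_headers_footers : Prop := ∀ (page_texts : List String), Dom_strip_headers_footers page_texts → Spec_strip_headers_footers page_texts (strip_headers_footers page_texts)

-- ===== LEMMAS AND PROOFS =====

-- membership in A's folded intersection
lemma mem_foldl_inter (f : List String → List String) (xs : List (List String))
    (s0 : PySem.Set String) (l : String) :
    l ∈ xs.foldl (fun s lines => PySem.Set.inter s (PySem.Set.ofList (f lines))) s0 ↔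
      l ∈ s0 ∧ ∀ lines ∈ xs, l ∈ f lines := by
  induction xs generalizing s0 with
  | nil => simp
  | cons y ys ih =>
    simp [List.foldl_cons, ih, PySem.Set.mem_inter, PySem.Set.mem_ofList]
    tauto

-- count of a key inside a deduped list is its membership indicator
lemma count_dedup (xs : List String) (l : String) :
    (PySem.List.dedup xs).count l = if l ∈ xs then 1 else 0 := by
  by_cases h : l ∈ xs
  · rw [if_pos h]
    exact List.count_eq_one_of_mem (PySem.List.nodup_dedup xs) ((PySem.List.mem_dedup xs l).2 h)
  · rw [if_neg h]
    exact List.count_eq_zero.2 (fun hm => h ((PySem.List.mem_dedup xs l).1 hm))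

-- B's tally value = number of pages whose candidate list contains l
lemma tally_getD (f : List String → List String) (xs : List (List String))
    (d : PySem.Dict String Int) (l : String) :
    (xs.foldl (fun d lines => pvTallyStep d (f lines)) d).getD l 0 =
      d.getD l 0 + (xs.countP (fun p => decide (l ∈ f p)) : Int) := by
  induction xs generalizing d with
  | nil => simp
  | cons y ys ih =>
    rw [List.foldl_cons, ih, pvTallyStep, PySem.Dict.getD_foldl_modify_add_one, count_dedup,
      List.countP_cons]
    simp only [decide_eq_true_eq]
    split_ifs with h <;> push_cast <;> omega

-- any tally dict built from empty has unique keys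
lemma nodup_tally_keys (f : List String → List String) (xs : List (List String))
    (d : PySem.Dict String Int) (hd : d.keys.Nodup) :
    (xs.foldl (fun d lines => pvTallyStep d (f lines)) d).keys.Nodup := by
  induction xs generalizing d with
  | nil => exact hd
  | cons y ys ih =>
    rw [List.foldl_cons]
    exact ih _ (PySem.Dict.nodup_keys_foldl_modify_key (PySem.List.dedup (f y)) id 0
      (fun _ _ v => v + 1) d hd)

-- membership in B's filtered tally = tally value is exactly n (n ≠ 0)
lemma mem_filtered_tally (d : PySem.Dict String Int) (hd : d.keys.Nodup)
    (n : Int) (hn : n ≠ 0) (l : String) :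
    l ∈ PySem.Set.ofList ((d.items.filter (fun p => p.2 == n)).map (·.1)) ↔ d.getD l 0 = n := by
  rw [PySem.Set.mem_ofList]
  simp only [List.mem_map, List.mem_filter, beq_iff_eq]
  constructor
  · rintro ⟨⟨k, c⟩, ⟨hm, hc⟩, rfl⟩
    rw [PySem.Dict.getD_eq_get?_getD, PySem.Dict.get?_of_mem_items d hm hd]
    exact hc
  · intro h
    have hg : d.get? l = some n := by
      rw [PySem.Dict.getD_eq_get?_getD] at h
      cases hg : d.get? l with
      | none => rw [hg] at h; exact absurd h.symm hn
      | some c =>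
        rw [hg] at h
        simp only [Option.getD_some] at h
        rw [h]
    exact ⟨(l, n), ⟨(PySem.Dict.get?_eq_some_iff_mem_items d l n hd).1 hg, rfl⟩, rfl⟩

-- the two candidate sets agree as membership predicates
lemma headers_mem_eq (f : List String → List String) (hf0 : f [] = [])
    (p : List String) (ps : List (List String)) (l : String) :
    (l ∈ (p :: ps : List (List String)).tail.foldl
        (fun s lines => PySem.Set.inter s (PySem.Set.ofList (f lines)))
        (if (p :: ps : List (List String)).headD [] ≠ [] then
           PySem.Set.ofList (f ((p :: ps : List (List String)).headD [])) else PySem.Set.empty)) ↔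
    l ∈ PySem.Set.ofList
        ((((p :: ps : List (List String)).foldl
            (fun d lines => pvTallyStep d (f lines)) PySem.Dict.empty).items.filter
              (fun q => q.2 == ((p :: ps : List (List String)).length : Int))).map (·.1)) := by
  have hn : ((p :: ps : List (List String)).length : Int) ≠ 0 := by
    simp only [List.length_cons]
    push_cast
    omega
  rw [mem_filtered_tally _ (nodup_tally_keys f _ _ (by rw [PySem.Dict.keys_empty]; exact List.nodup_nil)) _ hn, tally_getD]
  have hinit : (if (p :: ps : List (List String)).headD [] ≠ [] then
      PySem.Set.ofList (f ((p :: ps : List (List String)).headD [])) else PySem.Set.empty)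
      = PySem.Set.ofList (f p) := by
    by_cases hp : p = []
    · subst hp
      simp [PySem.Set.empty, PySem.Set.ofList, hf0]
    · simp [hp]
  rw [hinit, mem_foldl_inter]
  simp only [PySem.Set.mem_ofList, PySem.Dict.getD_empty, List.length_cons]
  constructor
  · rintro ⟨h0, hall⟩
    have hcp : (p :: ps).countP (fun q => decide (l ∈ f q)) = (p :: ps).length :=
      List.countP_eq_length.2 (by
        intro a ha
        rcases List.mem_cons.1 ha with rfl | ha
        · exact decide_eq_true h0
        · exact decide_eq_true (hall a ha))
    rw [hcp]
    push_cast [List.length_cons]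
    ring
  · intro h
    have hcp : (p :: ps).countP (fun q => decide (l ∈ f q)) = (p :: ps).length := by
      have hle := List.countP_le_length (l := p :: ps) (p := fun q => decide (l ∈ f q))
      simp only [List.length_cons] at h hle ⊢
      push_cast at h
      omega
    have hall := List.countP_eq_length.1 hcp
    exact ⟨of_decide_eq_true (hall p (by simp)),
      fun lines hm => of_decide_eq_true (hall lines (List.mem_cons_of_mem _ hm))⟩

-- loop congruence: the while loops only look at set membership
lemma startLoop_congr_aux (h1 h2 : PySem.Set String)
    (hc : ∀ x, PySem.Set.contains h1 x = PySem.Set.contains h2 x) :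
    ∀ (k : Nat) (lines : List String) (start : Nat), lines.length - start ≤ k →
      pvStartLoop lines h1 start = pvStartLoop lines h2 start := by
  intro k
  induction k with
  | zero =>
    intro lines start hle
    conv_lhs => rw [pvStartLoop]
    conv_rhs => rw [pvStartLoop]
    have hlt : ¬ start < lines.length := by omega
    simp [hlt]
  | succ k ih =>
    intro lines start hle
    conv_lhs => rw [pvStartLoop]
    conv_rhs => rw [pvStartLoop]
    simp only [hc]
    split_ifs with hlt hm
    · exact ih lines (start + 1) (by omega)
    · rfl
    · rfl

lemma endLoop_congr (f1 f2 : PySem.Set String)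
    (hc : ∀ x, PySem.Set.contains f1 x = PySem.Set.contains f2 x) :
    ∀ (lines : List String) (e : Nat), pvEndLoop lines f1 e = pvEndLoop lines f2 e := by
  intro lines e
  induction e with
  | zero =>
    conv_lhs => rw [pvEndLoop]
    conv_rhs => rw [pvEndLoop]
    simp
  | succ e ih =>
    conv_lhs => rw [pvEndLoop]
    conv_rhs => rw [pvEndLoop]
    simp only [hc]
    split_ifs with h0 hm
    · exact ih
    · rfl
    · rfl

lemma trimPage_congr (h1 h2 f1 f2 : PySem.Set String)
    (hh : ∀ x, PySem.Set.contains h1 x = PySem.Set.contains h2 x)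
    (hf : ∀ x, PySem.Set.contains f1 x = PySem.Set.contains f2 x)
    (lines : List String) :
    pvTrimPage h1 f1 lines = pvTrimPage h2 f2 lines := by
  unfold pvTrimPage
  rw [startLoop_congr_aux h1 h2 hh lines.length lines 0 (by omega),
    endLoop_congr f1 f2 hf lines lines.length]

-- turn the membership iff into contains-equality
lemma contains_eq_of_mem_iff (s t : PySem.Set String) (h : ∀ x, x ∈ s ↔ x ∈ t) :
    ∀ x, PySem.Set.contains s x = PySem.Set.contains t x := by
  intro x
  apply Bool.eq_iff_iff.2
  rw [PySem.Set.contains_iff, PySem.Set.contains_iff]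
  exact h x

-- ===== VERDICT (by name: the statement is the Claim_ definition above) =====
theorem strip_headers_footers_spec : Claim_equal_strip_headers_footers := by
  intro page_texts _
  unfold Spec_strip_headers_footers strip_headers_footers strip_headers_footers_alt
  by_cases hpt : page_texts = []
  · simp [hpt]
  · rw [if_neg hpt, if_neg hpt]
    cases hp : page_texts.map PySem.Str.splitlines with
    | nil =>
      exact absurd (List.map_eq_nil_iff.1 hp) hpt
    | cons p ps =>
      apply congrArg (PySem.Str.join "\n")
      apply List.map_congr_left
      intro lines _
      apply trimPage_congr
      · exact contains_eq_of_mem_iff _ _ (fun x =>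
          headers_mem_eq (fun lines => PySem.List.slice lines none (some HDR_FTR_MAX_LINES))
            (by decide) p ps x)
      · exact contains_eq_of_mem_iff _ _ (fun x =>
          headers_mem_eq (fun lines => PySem.List.slice lines (some (-HDR_FTR_MAX_LINES)) none)
            (by decide) p ps x)
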